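-- pv_equiv track=rewrite | github.com/GridTools/gt4py | src/gt4py/backend/gt_cpu_backend.py | make_x86_layout_map
-- ===== SOURCE A (Python) =====
-- def make_x86_layout_map(mask):
--     ctr = iter(range(sum(mask)))
--     if len(mask) < 3:
--         layout = [next(ctr) if m else None for m in mask]
--     else:
--         swapped_mask = [*mask[3:], *mask[:3]]
--         layout = [next(ctr) if m else None for m in swapped_mask]
--
--         layout = [*layout[-3:], *layout[:-3]]
--
--     return tuple(layout)
-- ===== SOURCE B (Python) =====
-- def make_x86_layout_map(mask):
--     n = len(mask)
--     pref = [0] * (n + 1)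
--     for i, m in enumerate(mask):
--         pref[i + 1] = pref[i] + (1 if m else 0)
--     base = 3 if 3 <= n else 0
--
--     def rank(i):
--         if base <= i:
--             return pref[i] - pref[base]
--         return pref[n] - pref[base] + pref[i]
--
--     return tuple(rank(i) if m else None for i, m in enumerate(mask))
-- ===== Notes on version B (the rewrite author's own statement) =====
-- stated objective: alternative
-- what changed: Replaces A's sequential counter over a rearranged mask copy plus slice-rotation with a prefix-sum table and a stateless closed-form rank per index (pref[i]-pref[base], or pref[n]-pref[base]+pref[i] for the rotated front), emitting the tuple in natural index order.
import Mathlib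
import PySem

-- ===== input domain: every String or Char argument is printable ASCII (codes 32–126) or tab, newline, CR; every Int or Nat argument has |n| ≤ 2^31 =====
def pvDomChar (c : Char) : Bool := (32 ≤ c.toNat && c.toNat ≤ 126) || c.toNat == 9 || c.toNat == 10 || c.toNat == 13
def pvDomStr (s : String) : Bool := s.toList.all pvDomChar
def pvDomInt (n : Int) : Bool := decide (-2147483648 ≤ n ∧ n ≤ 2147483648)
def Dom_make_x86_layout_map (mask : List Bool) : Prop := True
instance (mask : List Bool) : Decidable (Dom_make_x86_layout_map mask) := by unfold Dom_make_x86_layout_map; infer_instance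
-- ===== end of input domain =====

-- B replaces A's sequential counter + rearranged copy + slice-rotation with a prefix-sum
-- table and a stateless per-index rank formula; same cost, different algorithm.

-- ===== PORT A =====
-- the comprehension '[next(ctr) if m else None for m in xs]' where ctr yields c, c+1, …
def pvLayoutOf : List Bool → Int → List (Option Int)
  | [], _ => []
  | m :: t, c => if m then some c :: pvLayoutOf t (c + 1) else none :: pvLayoutOf t c

def make_x86_layout_map (mask : List Bool) : List (Option Int) :=
  if mask.length < 3 then
    pvLayoutOf mask 0
  else
    -- swapped_mask = [*mask[3:], *mask[:3]]
    let swapped_mask := PySem.List.slice mask (some 3) none ++ PySem.List.slice mask none (some 3)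
    let layout := pvLayoutOf swapped_mask 0
    -- layout = [*layout[-3:], *layout[:-3]]
    PySem.List.slice layout (some (-3)) none ++ PySem.List.slice layout none (some (-3))

-- ===== PORT B =====
-- the prefix-count table: pvPref q c = [c, c+cnt(q[:1]), c+cnt(q[:2]), …] (the loop filling pref)
def pvPref : List Bool → Int → List Int
  | [], c => [c]
  | m :: t, c => c :: pvPref t (c + if m then 1 else 0)

-- pref[i] as Python reads it; every index used is in range, so getD is exact
def make_x86_layout_map_alt (mask : List Bool) : List (Option Int) :=
  let n := mask.length
  let pref := pvPref mask 0
  let base : Nat := if 3 ≤ n then 3 else 0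
  let rank : Nat → Int := fun i =>
    if base ≤ i then pref.getD i 0 - pref.getD base 0
    else pref.getD n 0 - pref.getD base 0 + pref.getD i 0
  mask.zipIdx.map (fun p => if p.1 then some (rank p.2) else none)

-- ===== PRECONDITION & SPEC =====
def Spec_make_x86_layout_map (mask : List Bool) (out : List (Option Int)) : Prop := out = make_x86_layout_map_alt mask
instance (mask : List Bool) (out : List (Option Int)) : Decidable (Spec_make_x86_layout_map mask out) := by unfold Spec_make_x86_layout_map; infer_instance

-- ===== CLAIM (what is proved, stated in full; the proofs are below) =====
def Claim_equal_make_x86_layout_map : Prop := ∀ (mask : List Bool), Dom_make_x86_layout_map mask → Spec_make_x86_layout_map mask (make_x86_layout_map mask)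

-- ===== LEMMAS AND PROOFS =====

theorem pvLayoutOf_length (q : List Bool) (c : Int) : (pvLayoutOf q c).length = q.length := by
  induction q generalizing c with
  | nil => rfl
  | cons m t ih => cases m <;> simp [pvLayoutOf, ih]

theorem pvLayoutOf_append (q p : List Bool) (c : Int) :
    pvLayoutOf (q ++ p) c = pvLayoutOf q c ++ pvLayoutOf p (c + (q.count true : Int)) := by
  induction q generalizing c with
  | nil => simp [pvLayoutOf]
  | cons m t ih =>
    cases m <;> simp [pvLayoutOf, ih, List.count_cons] <;> ring_nf

-- the i-th layout entry, closed form
theorem pvLayoutOf_getElem (q : List Bool) (c : Int) (i : Nat) (h : i < q.length) :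
    (pvLayoutOf q c)[i]'(by rw [pvLayoutOf_length]; exact h)
      = if q[i] then some (c + ((q.take i).count true : Int)) else none := by
  induction q generalizing c i with
  | nil => simp at h
  | cons m t ih =>
    cases i with
    | zero => cases m <;> simp [pvLayoutOf]
    | succ j =>
      have hj : j < t.length := by simpa using h
      cases m <;>
        simp [pvLayoutOf, ih _ _ hj, List.count_cons] <;>
        ring_nf

theorem pvPref_getD (q : List Bool) (c : Int) (i : Nat) (h : i ≤ q.length) :
    (pvPref q c).getD i 0 = c + ((q.take i).count true : Int) := by
  induction q generalizing c i with
  | nil =>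
    have : i = 0 := by simpa using h
    subst this
    simp [pvPref]
  | cons m t ih =>
    cases i with
    | zero => simp [pvPref]
    | succ j =>
      have hj : j ≤ t.length := by simpa using h
      cases m <;> simp only [pvPref, List.getD_cons_succ, ih _ _ hj] <;>
        simp [List.count_cons] <;> ring_nf

-- ===== VERDICT (by name: the statement is the Claim_ definition above) =====
theorem make_x86_layout_map_spec : Claim_equal_make_x86_layout_map := by
  intro mask _
  unfold Spec_make_x86_layout_map make_x86_layout_map make_x86_layout_map_alt
  by_cases hlen : mask.length < 3
  · -- short masks: base = 0, rank i = pref[i]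
    simp only [hlen, if_pos, show ¬ (3 ≤ mask.length) by omega, if_neg, not_false_eq_true]
    refine List.ext_getElem (by simp [pvLayoutOf_length]) ?_
    intro i h1 h2
    have hi : i < mask.length := by simpa [pvLayoutOf_length] using h1
    rw [pvLayoutOf_getElem mask 0 i hi]
    rw [List.getElem_map, List.getElem_zipIdx]
    simp only [Nat.zero_add]
    simp only [pvPref_getD mask 0 i (by omega), pvPref_getD mask 0 0 (by omega)]
    simp
  · -- n ≥ 3 : A = pvLayoutOf p (cnt q) ++ pvLayoutOf q 0 with p = take 3, q = drop 3
    simp only [hlen, if_neg, not_false_eq_true, show (3 ≤ mask.length) by omega, if_pos]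
    have h3 : 3 ≤ mask.length := by omega
    set p := mask.take 3 with hp
    set q := mask.drop 3 with hq
    have hplen : p.length = 3 := by simp [hp]; omega
    have hqlen : q.length = mask.length - 3 := by simp [hq]
    have hslices : PySem.List.slice mask (some 3) none ++ PySem.List.slice mask none (some 3) = q ++ p := by
      rw [show ((3 : Int)) = ((3 : Nat) : Int) by norm_num,
          PySem.List.slice_from_natCast, PySem.List.slice_to_natCast]
    have hA : pvLayoutOf (q ++ p) 0 = pvLayoutOf q 0 ++ pvLayoutOf p ((q.count true : Int)) := by
      simpa using pvLayoutOf_append q p 0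
    have hlaylen : (pvLayoutOf (q ++ p) 0).length = mask.length := by
      rw [pvLayoutOf_length]; simp [hqlen, hplen]; omega
    have hql : (pvLayoutOf q 0).length = mask.length - 3 := by rw [pvLayoutOf_length, hqlen]
    have hAslices :
        PySem.List.slice (pvLayoutOf (q ++ p) 0) (some (-3)) none
          ++ PySem.List.slice (pvLayoutOf (q ++ p) 0) none (some (-3))
        = pvLayoutOf p ((q.count true : Int)) ++ pvLayoutOf q 0 := by
      rw [PySem.List.slice_from_neg_ofNat _ 3 (by omega),
          PySem.List.slice_to_neg_ofNat _ 3 (by omega), hlaylen, hA]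
      rw [List.drop_append_of_le_length (by omega), List.take_append_of_le_length (by omega)]
      rw [← hql]; simp
    rw [hslices, hAslices]
    -- now compare entry-wise with B
    refine List.ext_getElem (by simp [pvLayoutOf_length, hplen, hqlen]; omega) ?_
    intro i h1 h2
    have hi : i < mask.length := by
      simpa [pvLayoutOf_length, hplen, hqlen] using h2
    rw [List.getElem_map, List.getElem_zipIdx]
    simp only [Nat.zero_add]
    have hcnt_all : ((mask.take mask.length).count true : Int)
        = (p.count true : Int) + (q.count true : Int) := by
      rw [List.take_length, ← List.take_append_drop 3 mask, ← hp, ← hq]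
      simp [List.count_append]
    by_cases hcase : i < 3
    · -- left block: entry of pvLayoutOf p (cnt q)
      have hip : i < (pvLayoutOf p ((q.count true : Int))).length := by
        rw [pvLayoutOf_length, hplen]; exact hcase
      rw [List.getElem_append_left hip, pvLayoutOf_getElem p _ i (by omega)]
      have hmp : p[i]'(by omega) = mask[i]'hi := by
        simp [hp, List.getElem_take]
      have htk : p.take i = mask.take i := by
        rw [hp, List.take_take]; congr 1; omega
      rw [hmp, htk]
      have : ¬ (3 ≤ i) := by omega
      simp only [this, if_neg, not_false_eq_true]
      simp only [pvPref_getD mask 0 mask.length (by omega), pvPref_getD mask 0 3 (by omega),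
          pvPref_getD mask 0 i (by omega), hcnt_all,
          show ((mask.take 3).count true : Int) = (p.count true : Int) by rw [← hp]]
      ring_nf
    · -- right block: entry of pvLayoutOf q 0
      have hleft : (pvLayoutOf p ((q.count true : Int))).length = 3 := by
        rw [pvLayoutOf_length, hplen]
      have hiq : i - 3 < (pvLayoutOf q 0).length := by
        rw [pvLayoutOf_length, hqlen]; omega
      rw [List.getElem_append_right (by omega)]
      simp only [hleft]
      rw [pvLayoutOf_getElem q 0 (i - 3) (by omega)]
      have hmq : q[i - 3]'(by omega) = mask[i]'hi := by
        simp only [hq, List.getElem_drop]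
        congr 1; omega
      have htk : mask.take i = p ++ q.take (i - 3) := by
        have h : mask.take (3 + (i - 3)) = mask.take 3 ++ (mask.drop 3).take (i - 3) := List.take_add
        rw [show 3 + (i - 3) = i by omega] at h
        rw [hp, hq]; exact h
      rw [hmq]
      have h3i : 3 ≤ i := by omega
      simp only [h3i, if_pos]
      simp only [pvPref_getD mask 0 i (by omega), pvPref_getD mask 0 3 (by omega),
          show ((mask.take i).count true : Int)
            = (p.count true : Int) + ((q.take (i-3)).count true : Int) by
              rw [htk]; simp [List.count_append],
          show ((mask.take 3).count true : Int) = (p.count true : Int) by rw [← hp]]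
      ring_nf
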